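-- pv_equiv track=rewrite | github.com/sbfnk/dotfiles | config/alfred/workflows/cal-entry/cal_filter.py | strip_ordinal
-- ===== SOURCE A (Python) =====
-- def strip_ordinal(s: str) -> str:
--     """Remove ordinal suffix (st, nd, rd, th) from a string."""
--     s_lower = s.lower()
--     for suffix in ('st', 'nd', 'rd', 'th'):
--         if s_lower.endswith(suffix) and len(s_lower) > len(suffix):
--             base = s_lower[:-len(suffix)]
--             if base.isdigit():
--                 return base
--     return s_lower
-- ===== SOURCE B (Python) =====
-- def strip_ordinal(s: str) -> str:
--     """Remove ordinal suffix (st, nd, rd, th) from a string."""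
--     t = s.lower()
--     i = 0
--     while i < len(t) and t[i].isdigit():
--         i += 1
--     if i > 0 and t[i:] in ('st', 'nd', 'rd', 'th'):
--         return t[:i]
--     return t
-- ===== Notes on version B (the rewrite author's own statement) =====
-- stated objective: alternative
-- what changed: Instead of looping over the four suffixes and testing endswith/slice/isdigit for each, B scans the lowercased string once from the front for its maximal digit run and returns that run iff the remainder is exactly one of the ordinal suffixes.
import Mathlib
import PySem

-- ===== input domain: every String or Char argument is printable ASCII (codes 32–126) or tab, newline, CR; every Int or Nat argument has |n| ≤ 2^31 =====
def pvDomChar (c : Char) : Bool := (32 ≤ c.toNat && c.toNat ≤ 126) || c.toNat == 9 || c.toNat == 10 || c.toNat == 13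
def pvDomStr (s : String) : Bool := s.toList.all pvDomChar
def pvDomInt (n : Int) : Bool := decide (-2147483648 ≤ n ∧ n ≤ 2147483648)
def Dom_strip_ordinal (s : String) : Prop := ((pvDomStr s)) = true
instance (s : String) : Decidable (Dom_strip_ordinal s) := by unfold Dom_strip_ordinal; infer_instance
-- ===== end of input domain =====

-- B replaces A's loop over the four suffixes (each doing endswith + slice + isdigit)
-- by a single forward scan for the maximal digit prefix, returning it iff the rest is
-- exactly one ordinal suffix; objective: alternative (same cost, different algorithm).

-- ===== PORT A =====
-- A's 'for suffix in (…): …' loop, transliterated as a recursion over the suffix list.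
def stripOrdLoop (t : String) : List String → String
  | [] => t
  | suf :: rest =>
    if PySem.Str.endswith t suf ∧ PySem.Str.len t > PySem.Str.len suf then
      let base := PySem.Str.slice t none (some (-(PySem.Str.len suf)))
      if PySem.Str.strIsdigit base then base else stripOrdLoop t rest
    else stripOrdLoop t rest

def strip_ordinal (s : String) : String :=
  let s_lower := PySem.Str.lower s
  stripOrdLoop s_lower ["st", "nd", "rd", "th"]

-- ===== PORT B =====
-- B's 'while i < len(t) and t[i].isdigit(): i += 1' scan, as a structural recursion.
def digitRunLen : List Char → Nat
  | [] => 0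
  | c :: cs => if PySem.Chars.isdigit c then digitRunLen cs + 1 else 0

def strip_ordinal_alt (s : String) : String :=
  let t := PySem.Str.lower s
  let i := digitRunLen t.toList
  if 0 < i ∧ PySem.Str.slice t (some (i : Int)) none ∈ ["st", "nd", "rd", "th"] then
    PySem.Str.slice t none (some (i : Int))
  else t

-- ===== PRECONDITION & SPEC =====
def Spec_strip_ordinal (s : String) (out : String) : Prop := out = strip_ordinal_alt s
instance (s : String) (out : String) : Decidable (Spec_strip_ordinal s out) := by unfold Spec_strip_ordinal; infer_instance

-- ===== CLAIM (what is proved, stated in full; the proofs are below) =====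
def Claim_equal_strip_ordinal : Prop := ∀ (s : String), Dom_strip_ordinal s → Spec_strip_ordinal s (strip_ordinal s)

-- ===== LEMMAS AND PROOFS =====

-- the maximal digit prefix: what digitRunLen takes is all digits
theorem take_digitRunLen_all (l : List Char) :
    (l.take (digitRunLen l)).all PySem.Chars.isdigit = true := by
  induction l with
  | nil => simp [digitRunLen]
  | cons c cs ih =>
    by_cases h : PySem.Chars.isdigit c
    · simp [digitRunLen, h, ih]
    · simp [digitRunLen, h]

-- digitRunLen is determined: all-digit prefix followed by a non-digit (or nothing)
theorem digitRunLen_append (a b : List Char) (ha : a.all PySem.Chars.isdigit = true)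
    (hb : ∀ c, b = c :: b.tail → PySem.Chars.isdigit c = false) :
    digitRunLen (a ++ b) = a.length := by
  induction a with
  | nil =>
    cases b with
    | nil => simp [digitRunLen]
    | cons c cs => simp [digitRunLen, hb c rfl]
  | cons c cs ih =>
    simp only [List.all_cons, Bool.and_eq_true] at ha
    simp [digitRunLen, ha.1, ih ha.2]

theorem digitRunLen_le_length (l : List Char) : digitRunLen l ≤ l.length := by
  induction l with
  | nil => simp [digitRunLen]
  | cons c cs ih =>
    by_cases h : PySem.Chars.isdigit c
    · simp [digitRunLen, h]; omega
    · simp [digitRunLen, h]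

-- A's per-suffix condition holds iff B's scan lands exactly before this suffix.
-- suf is a 2-character suffix whose characters are not digits.
theorem condA_iff (l : List Char) (c₁ c₂ : Char)
    (h₁ : PySem.Chars.isdigit c₁ = false) :
    (PySem.Chars.endswith l [c₁, c₂] = true ∧ (l.length : Int) > 2 ∧
      PySem.Chars.strIsdigit (l.take (l.length - 2)) = true)
    ↔ (0 < digitRunLen l ∧ l.drop (digitRunLen l) = [c₁, c₂]) := by
  constructor
  · rintro ⟨hend, hlen, hdig⟩
    rw [PySem.Chars.endswith_iff] at hend
    have hL : l.length > 2 := by exact_mod_cast hlen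
    have heq : [c₁, c₂] = l.drop (l.length - 2) := List.suffix_iff_eq_drop.mp hend
    have hsplit : l = l.take (l.length - 2) ++ [c₁, c₂] := by
      rw [heq, List.take_append_drop]
    simp only [PySem.Chars.strIsdigit] at hdig
    have hall : (l.take (l.length - 2)).all PySem.Chars.isdigit = true := by
      revert hdig; cases l.take (l.length - 2) <;> simp
    have hrun : digitRunLen l = (l.take (l.length - 2)).length := by
      conv_lhs => rw [hsplit]
      exact digitRunLen_append _ _ hall (by intro c hc; cases hc; exact h₁)
    have hne : l.take (l.length - 2) ≠ [] := by
      revert hdig; cases l.take (l.length - 2) <;> simp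
    have hlen2 : (l.take (l.length - 2)).length = l.length - 2 := by
      simp [List.length_take]
    constructor
    · rw [hrun, hlen2]
      omega
    · rw [hrun, hlen2, ← heq]
  · rintro ⟨hpos, hdrop⟩
    set i := digitRunLen l with hi
    clear_value i
    have hile : i ≤ l.length := hi ▸ digitRunLen_le_length l
    have hlen : l.length = i + 2 := by
      have := congrArg List.length hdrop
      simp [List.length_drop] at this; omega
    refine ⟨?_, ?_, ?_⟩
    · rw [PySem.Chars.endswith_iff, ← hdrop]
      exact l.drop_suffix i
    · rw [hlen]; push_cast; omega
    · have htk : l.take (l.length - 2) = l.take i := by rw [hlen]; simp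
      rw [htk]
      have hall := take_digitRunLen_all l
      have hne : l.take i ≠ [] := by
        intro h
        have h2 : (l.take i).length = 0 := by rw [h]; rfl
        rw [List.length_take] at h2
        omega
      simp only [PySem.Chars.strIsdigit]
      revert hall hne
      rw [← hi]
      cases l.take i <;> simp

-- distinct two-character suffixes cannot both end the same string
theorem endswith_two_unique (l : List Char) (c₁ c₂ d₁ d₂ : Char)
    (h : PySem.Chars.endswith l [c₁, c₂] = true)
    (h' : PySem.Chars.endswith l [d₁, d₂] = true) : c₁ = d₁ ∧ c₂ = d₂ := by
  rw [PySem.Chars.endswith_iff] at h h'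
  have e1 : [c₁, c₂] = l.drop (l.length - 2) := List.suffix_iff_eq_drop.mp h
  have e2 : [d₁, d₂] = l.drop (l.length - 2) := List.suffix_iff_eq_drop.mp h'
  rw [← e1] at e2
  have h2 : d₁ = c₁ ∧ d₂ = c₂ := by simpa using e2
  exact ⟨h2.1.symm, h2.2.symm⟩

-- unfold one iteration of A's loop into the list-level condition (suf of length 2)
theorem stripOrdLoop_cons (t suf : String) (rest : List String)
    (hlen : suf.toList.length = 2) :
    stripOrdLoop t (suf :: rest) =
      if PySem.Chars.endswith t.toList suf.toList = true ∧ (t.toList.length : Int) > 2 ∧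
          PySem.Chars.strIsdigit (t.toList.take (t.toList.length - 2)) = true then
        PySem.Str.slice t none (some (-2))
      else stripOrdLoop t rest := by
  have hL : PySem.Str.len suf = 2 := by simp [PySem.Str.len_eq, hlen]
  have hT : PySem.Str.len t = (t.toList.length : Int) := by
    simp [PySem.Str.len_eq]
  simp only [stripOrdLoop, hL, hT, PySem.Str.endswith_eq]
  have hbase : PySem.Str.strIsdigit (PySem.Str.slice t none (some (-2))) =
      PySem.Chars.strIsdigit (t.toList.take (t.toList.length - 2)) := by
    rw [PySem.Str.strIsdigit_eq, PySem.Str.toList_slice, PySem.Chars.slice_eq_listSlice,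
      PySem.List.slice_to_neg_ofNat t.toList 2 (by omega)]
  rw [hbase]
  by_cases h1 : PySem.Chars.endswith t.toList suf.toList = true
  · by_cases h2 : ((t.toList.length : Int) > 2)
    · by_cases h3 : PySem.Chars.strIsdigit (t.toList.take (t.toList.length - 2)) = true
      · rw [if_pos ⟨h1, h2⟩, if_pos h3, if_pos ⟨h1, h2, h3⟩]
      · rw [if_pos ⟨h1, h2⟩, if_neg h3, if_neg (by tauto)]
    · rw [if_neg (by tauto), if_neg (by tauto)]
  · rw [if_neg (by tauto), if_neg (by tauto)]

-- the heart: for every string t, A's loop over the four suffixes equals B's body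
theorem loop_eq_alt (t : String) :
    stripOrdLoop t ["st", "nd", "rd", "th"] =
      (if 0 < digitRunLen t.toList ∧
          PySem.Str.slice t (some ((digitRunLen t.toList : Nat) : Int)) none ∈
            (["st", "nd", "rd", "th"] : List String) then
        PySem.Str.slice t none (some ((digitRunLen t.toList : Nat) : Int))
      else t) := by
  set l := t.toList with hl
  set i := digitRunLen l with hi
  have hdropStr : (PySem.Str.slice t (some (i : Int)) none).toList = l.drop i := by
    rw [PySem.Str.toList_slice, PySem.Chars.slice_eq_listSlice, PySem.List.slice_from_natCast]
  have hiff : ∀ u : String, (PySem.Str.slice t (some (i : Int)) none = u) ↔ l.drop i = u.toList := by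
    intro u
    constructor
    · intro h; rw [← hdropStr, h]
    · intro h; apply String.toList_inj.mp; rw [hdropStr, h]
  have hst : "st".toList = ['s','t'] := by decide
  have hnd : "nd".toList = ['n','d'] := by decide
  have hrd : "rd".toList = ['r','d'] := by decide
  have hth : "th".toList = ['t','h'] := by decide
  have hmem : (PySem.Str.slice t (some (i : Int)) none ∈ (["st", "nd", "rd", "th"] : List String))
      ↔ (l.drop i ∈ ([['s','t'], ['n','d'], ['r','d'], ['t','h']] : List (List Char))) := by
    simp only [List.mem_cons, hiff, hst, hnd, hrd, hth, List.not_mem_nil, or_false]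
  by_cases hB : 0 < i ∧ l.drop i ∈ ([['s','t'], ['n','d'], ['r','d'], ['t','h']] : List (List Char))
  · rw [if_pos ⟨hB.1, hmem.mpr hB.2⟩]
    rcases hB with ⟨hpos, hd⟩
    have hlen : l.length = i + 2 := by
      have hile : i ≤ l.length := by rw [hi, hl]; exact digitRunLen_le_length _
      simp only [List.mem_cons, List.not_mem_nil, or_false] at hd
      rcases hd with h | h | h | h <;>
        · have := congrArg List.length h
          simp [List.length_drop] at this
          omega
    have hslice2 : PySem.Str.slice t none (some (-2)) = PySem.Str.slice t none (some (i : Int)) := by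
      apply String.toList_inj.mp
      rw [PySem.Str.toList_slice, PySem.Str.toList_slice, PySem.Chars.slice_eq_listSlice,
        PySem.Chars.slice_eq_listSlice, PySem.List.slice_to_neg_ofNat _ 2 (by omega),
        PySem.List.slice_to_natCast, ← hl, hlen]
      simp
    -- which suffix matched determines how the loop runs
    simp only [List.mem_cons, List.not_mem_nil, or_false] at hd
    have hAiff := fun c₁ c₂ h₁ => condA_iff l c₁ c₂ h₁
    rcases hd with h | h | h | h
    · -- "st"
      have hA : PySem.Chars.endswith l ['s','t'] = true ∧ (l.length : Int) > 2 ∧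
          PySem.Chars.strIsdigit (l.take (l.length - 2)) = true :=
        (hAiff 's' 't' (by decide)).mpr ⟨hpos, h⟩
      rw [stripOrdLoop_cons t "st" _ (by decide), ← hl, hst, if_pos hA, hslice2]
    · -- "nd"
      have hA : PySem.Chars.endswith l ['n','d'] = true ∧ (l.length : Int) > 2 ∧
          PySem.Chars.strIsdigit (l.take (l.length - 2)) = true :=
        (hAiff 'n' 'd' (by decide)).mpr ⟨hpos, h⟩
      have hnot1 : ¬ (PySem.Chars.endswith l ['s','t'] = true ∧ (l.length : Int) > 2 ∧
          PySem.Chars.strIsdigit (l.take (l.length - 2)) = true) := by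
        rintro ⟨he, -, -⟩
        have := endswith_two_unique l 's' 't' 'n' 'd' he hA.1
        simp at this
      rw [stripOrdLoop_cons t "st" _ (by decide), ← hl, hst, if_neg hnot1,
        stripOrdLoop_cons t "nd" _ (by decide), ← hl, hnd, if_pos hA, hslice2]
    · -- "rd"
      have hA : PySem.Chars.endswith l ['r','d'] = true ∧ (l.length : Int) > 2 ∧
          PySem.Chars.strIsdigit (l.take (l.length - 2)) = true :=
        (hAiff 'r' 'd' (by decide)).mpr ⟨hpos, h⟩
      have hnot1 : ¬ (PySem.Chars.endswith l ['s','t'] = true ∧ (l.length : Int) > 2 ∧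
          PySem.Chars.strIsdigit (l.take (l.length - 2)) = true) := by
        rintro ⟨he, -, -⟩
        have := endswith_two_unique l 's' 't' 'r' 'd' he hA.1
        simp at this
      have hnot2 : ¬ (PySem.Chars.endswith l ['n','d'] = true ∧ (l.length : Int) > 2 ∧
          PySem.Chars.strIsdigit (l.take (l.length - 2)) = true) := by
        rintro ⟨he, -, -⟩
        have := endswith_two_unique l 'n' 'd' 'r' 'd' he hA.1
        simp at this
      rw [stripOrdLoop_cons t "st" _ (by decide), ← hl, hst, if_neg hnot1,
        stripOrdLoop_cons t "nd" _ (by decide), ← hl, hnd, if_neg hnot2,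
        stripOrdLoop_cons t "rd" _ (by decide), ← hl, hrd, if_pos hA, hslice2]
    · -- "th"
      have hA : PySem.Chars.endswith l ['t','h'] = true ∧ (l.length : Int) > 2 ∧
          PySem.Chars.strIsdigit (l.take (l.length - 2)) = true :=
        (hAiff 't' 'h' (by decide)).mpr ⟨hpos, h⟩
      have hnot1 : ¬ (PySem.Chars.endswith l ['s','t'] = true ∧ (l.length : Int) > 2 ∧
          PySem.Chars.strIsdigit (l.take (l.length - 2)) = true) := by
        rintro ⟨he, -, -⟩
        have := endswith_two_unique l 's' 't' 't' 'h' he hA.1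
        simp at this
      have hnot2 : ¬ (PySem.Chars.endswith l ['n','d'] = true ∧ (l.length : Int) > 2 ∧
          PySem.Chars.strIsdigit (l.take (l.length - 2)) = true) := by
        rintro ⟨he, -, -⟩
        have := endswith_two_unique l 'n' 'd' 't' 'h' he hA.1
        simp at this
      have hnot3 : ¬ (PySem.Chars.endswith l ['r','d'] = true ∧ (l.length : Int) > 2 ∧
          PySem.Chars.strIsdigit (l.take (l.length - 2)) = true) := by
        rintro ⟨he, -, -⟩
        have := endswith_two_unique l 'r' 'd' 't' 'h' he hA.1
        simp at this
      rw [stripOrdLoop_cons t "st" _ (by decide), ← hl, hst, if_neg hnot1,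
        stripOrdLoop_cons t "nd" _ (by decide), ← hl, hnd, if_neg hnot2,
        stripOrdLoop_cons t "rd" _ (by decide), ← hl, hrd, if_neg hnot3,
        stripOrdLoop_cons t "th" _ (by decide), ← hl, hth, if_pos hA, hslice2]
  · rw [if_neg (fun hc => hB ⟨hc.1, hmem.mp hc.2⟩)]
    -- no condA holds: each suffix branch fails
    have hfail : ∀ c₁ c₂ : Char, PySem.Chars.isdigit c₁ = false →
        ([c₁, c₂] ∈ ([['s','t'], ['n','d'], ['r','d'], ['t','h']] : List (List Char))) →
        ¬ (PySem.Chars.endswith l [c₁, c₂] = true ∧ (l.length : Int) > 2 ∧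
          PySem.Chars.strIsdigit (l.take (l.length - 2)) = true) := by
      intro c₁ c₂ h₁ hmem2 hc
      have := (condA_iff l c₁ c₂ h₁).mp hc
      exact hB ⟨this.1, this.2 ▸ hmem2⟩
    rw [stripOrdLoop_cons t "st" _ (by decide), ← hl, hst,
      if_neg (hfail 's' 't' (by decide) (by decide)),
      stripOrdLoop_cons t "nd" _ (by decide), ← hl, hnd,
      if_neg (hfail 'n' 'd' (by decide) (by decide)),
      stripOrdLoop_cons t "rd" _ (by decide), ← hl, hrd,
      if_neg (hfail 'r' 'd' (by decide) (by decide)),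
      stripOrdLoop_cons t "th" _ (by decide), ← hl, hth,
      if_neg (hfail 't' 'h' (by decide) (by decide))]
    rfl

-- ===== VERDICT (by name: the statement is the Claim_ definition above) =====
theorem strip_ordinal_spec : Claim_equal_strip_ordinal := by
  intro s _
  unfold Spec_strip_ordinal strip_ordinal strip_ordinal_alt
  exact loop_eq_alt (PySem.Str.lower s)
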